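-- pv_equiv track=rewrite | github.com/jdwalkerzhere/aoc-2022-1 | utils.py | populate_calorie_data
-- ===== SOURCE A (Python) =====
-- def populate_calorie_data(cal_list):
--     elf_calories = {}
--     ind = 0
--     elf = 1
--
--     while ind < len(cal_list):
--         if cal_list[ind] == '':
--             elf += 1
--             ind += 1
--             continue
--         if elf not in elf_calories:
--             elf_calories[elf] = int(cal_list[ind])
--             ind += 1
--         else:
--             elf_calories[elf] += int(cal_list[ind])
--             ind += 1
--     return elf_calories
-- ===== SOURCE B (Python) =====
-- def populate_calorie_data(cal_list):
--     groups = []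
--     cur = []
--     for line in cal_list:
--         if line == '':
--             groups.append(cur)
--             cur = []
--         else:
--             cur.append(int(line))
--     groups.append(cur)
--     return {i + 1: sum(g) for i, g in enumerate(groups) if g}
-- ===== Notes on version B (the rewrite author's own statement) =====
-- stated objective: simpler
-- what changed: Replaces the index/while loop that interleaves an elf counter with first-insert-vs-increment dict updates by a grouping pass (split on '') followed by one dict comprehension that sums each non-empty group with its 1-based enumerate index.
import Mathlib
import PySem

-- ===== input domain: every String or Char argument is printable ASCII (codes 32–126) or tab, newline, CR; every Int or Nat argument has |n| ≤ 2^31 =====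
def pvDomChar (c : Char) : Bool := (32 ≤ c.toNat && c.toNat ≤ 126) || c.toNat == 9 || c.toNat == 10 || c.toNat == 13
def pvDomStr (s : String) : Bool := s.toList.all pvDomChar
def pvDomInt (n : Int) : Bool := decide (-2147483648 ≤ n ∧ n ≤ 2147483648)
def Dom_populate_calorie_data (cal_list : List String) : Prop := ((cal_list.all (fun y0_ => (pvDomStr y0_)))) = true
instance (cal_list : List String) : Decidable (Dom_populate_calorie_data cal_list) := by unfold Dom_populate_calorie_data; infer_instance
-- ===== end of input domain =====

-- B replaces A's interleaved counter/first-vs-increment dict loop by a grouping pass plus one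
-- enumerate/filter/sum comprehension (objective: simpler decomposition, same cost).

-- ===== PORT A =====
-- the while loop over ind, carrying the dict and the current elf number
def pvALoop (l : List String) (d : PySem.Dict Int Int) (elf : Int) : PySem.Dict Int Int :=
  match l with
  | [] => d
  | s :: rest =>
    if s = "" then pvALoop rest d (elf + 1)
    else if d.contains elf = false then
      pvALoop rest (d.insert elf ((PySem.Int.ofStr? s).getD 0)) elf
    else
      pvALoop rest (d.insert elf (d.getD elf 0 + (PySem.Int.ofStr? s).getD 0)) elf

def populate_calorie_data (cal_list : List String) : List (Int × Int) :=
  (pvALoop cal_list PySem.Dict.empty 1).items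

-- ===== PORT B =====
-- grouping pass: groups done so far, and the current group being built
def pvBLoop (l : List String) (groups : List (List Int)) (cur : List Int) : List (List Int) :=
  match l with
  | [] => groups ++ [cur]
  | s :: rest =>
    if s = "" then pvBLoop rest (groups ++ [cur]) []
    else pvBLoop rest groups (cur ++ [(PySem.Int.ofStr? s).getD 0])

def populate_calorie_data_alt (cal_list : List String) : List (Int × Int) :=
  ((PySem.List.enumerate (pvBLoop cal_list [] []) 0).filter (fun p => !p.2.isEmpty)).map
    (fun p => (p.1 + 1, p.2.sum))

-- ===== PRECONDITION & SPEC =====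
-- Pre_ excludes exactly the inputs on which Python A raises ValueError: a non-empty line that
-- int() does not accept.
def Pre_populate_calorie_data (cal_list : List String) : Prop :=
  ∀ s ∈ cal_list, s = "" ∨ (PySem.Int.ofStr? s).isSome = true
instance (cal_list : List String) : Decidable (Pre_populate_calorie_data cal_list) := by
  unfold Pre_populate_calorie_data; infer_instance

def pvWitness_populate_calorie_data : List String := ["100", "200", "", "", "300", ""]

def Spec_populate_calorie_data (cal_list : List String) (out : List (Int × Int)) : Prop := out = populate_calorie_data_alt cal_list
instance (cal_list : List String) (out : List (Int × Int)) : Decidable (Spec_populate_calorie_data cal_list out) := by unfold Spec_populate_calorie_data; infer_instance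

-- ===== CLAIM (what is proved, stated in full; the proofs are below) =====
def Claim_equal_populate_calorie_data : Prop := ∀ (cal_list : List String), Dom_populate_calorie_data cal_list → Pre_populate_calorie_data cal_list → Spec_populate_calorie_data cal_list (populate_calorie_data cal_list)

-- ===== LEMMAS AND PROOFS =====

-- the (key, sum) entry a group contributes: nothing if the group is empty
def pvEmit (elf : Int) (cur : List Int) : List (Int × Int) :=
  if cur.isEmpty then [] else [(elf, cur.sum)]

-- common normal form of both programs: remaining lines, current elf number, current group
def pvSpecF (l : List String) (elf : Int) (cur : List Int) : List (Int × Int) :=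
  match l with
  | [] => pvEmit elf cur
  | s :: rest =>
    if s = "" then pvEmit elf cur ++ pvSpecF rest (elf + 1) []
    else pvSpecF rest elf (cur ++ [(PySem.Int.ofStr? s).getD 0])

-- B's post-processing, with a general enumerate start
def pvPost (gs : List (List Int)) (st : Int) : List (Int × Int) :=
  ((PySem.List.enumerate gs st).filter (fun p => !p.2.isEmpty)).map (fun p => (p.1 + 1, p.2.sum))

theorem pvPost_append_singleton (gs : List (List Int)) (g : List Int) (st : Int) :
    pvPost (gs ++ [g]) st = pvPost gs st ++ pvEmit (st + gs.length + 1) g := by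
  unfold pvPost pvEmit
  rw [PySem.List.enumerate_append]
  simp only [PySem.List.enumerate_cons, PySem.List.enumerate_nil, List.filter_append, List.map_append]
  by_cases h : g.isEmpty <;> simp [h]

theorem pvBLoop_post (l : List String) (gs : List (List Int)) (cur : List Int) (st : Int) :
    pvPost (pvBLoop l gs cur) st = pvPost gs st ++ pvSpecF l (st + gs.length + 1) cur := by
  induction l generalizing gs cur with
  | nil => simp [pvBLoop, pvSpecF, pvPost_append_singleton]
  | cons s rest ih =>
    unfold pvBLoop pvSpecF
    by_cases h : s = ""
    · rw [if_pos h, if_pos h, ih, pvPost_append_singleton]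
      simp only [List.length_append, List.length_cons, List.length_nil]
      push_cast
      ring_nf
      rw [List.append_assoc]
    · rw [if_neg h, if_neg h, ih]

theorem pvALoop_items (l : List String) (d : PySem.Dict Int Int) (pre : List (Int × Int))
    (elf : Int) (cur : List Int)
    (hitems : d.items = pre ++ pvEmit elf cur)
    (hnd : (pre.map Prod.fst).Nodup)
    (hlt : ∀ k ∈ pre.map Prod.fst, k < elf) :
    (pvALoop l d elf).items = pre ++ pvSpecF l elf cur := by
  induction l generalizing d pre elf cur with
  | nil => simpa [pvALoop, pvSpecF] using hitems
  | cons s rest ih =>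
    have hkeys : d.keys = pre.map Prod.fst ++ (pvEmit elf cur).map Prod.fst := by
      simp [PySem.Dict.keys, hitems]
    have helfpre : elf ∉ pre.map Prod.fst := fun h => lt_irrefl elf (hlt elf h)
    unfold pvALoop pvSpecF
    by_cases hs : s = ""
    · rw [if_pos hs, if_pos hs]
      rw [ih d (pre ++ pvEmit elf cur) (elf + 1) []
        (by simpa [pvEmit] using hitems)
        (by
          unfold pvEmit
          by_cases hc : cur.isEmpty
          · simp [hc, hnd]
          · simp [hc, List.nodup_append, hnd]
            exact fun a x hmem hax => helfpre (hax ▸ List.mem_map_of_mem hmem))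
        (by
          intro k hk
          unfold pvEmit at hk
          by_cases hc : cur.isEmpty
          · rw [if_pos hc] at hk
            simp only [List.append_nil] at hk
            exact lt_trans (hlt k hk) (by omega)
          · rw [if_neg hc, List.map_append] at hk
            rcases List.mem_append.mp hk with hk | hk
            · exact lt_trans (hlt k hk) (by omega)
            · simp at hk
              omega)]
      unfold pvEmit
      by_cases hc : cur.isEmpty <;> simp [hc]
    · rw [if_neg hs, if_neg hs]
      have hcont : d.contains elf = decide (elf ∈ d.keys) :=
        PySem.Dict.contains_eq_decide_mem_keys d elf
      by_cases hc : cur.isEmpty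
      · -- current group empty: elf not yet a key, fresh insert appends
        have hcur : cur = [] := by simpa [List.isEmpty_iff] using hc
        have hmem : elf ∉ d.keys := by
          rw [hkeys]; simp [pvEmit, hc, helfpre]
        have hcontf : d.contains elf = false := by simp [hcont, hmem]
        rw [if_pos hcontf]
        rw [ih _ pre elf [(PySem.Int.ofStr? s).getD 0]
          (by
            rw [PySem.Dict.items_insert_of_not_contains d _ hcontf, hitems]
            simp [pvEmit, hc])
          hnd hlt]
        simp [hcur]
      · -- current group non-empty: elf is the last key, in-place overwrite
        have hmem : elf ∈ d.keys := by rw [hkeys]; simp [pvEmit, hc]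
        have hcontt : d.contains elf = true := by simp [hcont, hmem]
        have hcontf : ¬ d.contains elf = false := by simp [hcontt]
        rw [if_neg hcontf]
        have hndk : d.keys.Nodup := by
          rw [hkeys]
          unfold pvEmit
          rw [if_neg hc]
          simp [List.nodup_append, hnd]
          exact fun a x hmem hax => helfpre (hax ▸ List.mem_map_of_mem hmem)
        have hmemit : (elf, cur.sum) ∈ d.items := by
          rw [hitems]; simp [pvEmit, hc]
        have hgetD : d.getD elf 0 = cur.sum :=
          PySem.Dict.getD_of_mem_items d hmemit hndk 0
        rw [ih _ pre elf (cur ++ [(PySem.Int.ofStr? s).getD 0])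
          (by
            rw [PySem.Dict.items_insert_of_contains d _ hcontt, hitems]
            rw [List.map_append]
            congr 1
            · refine (List.map_congr_left ?_).trans (List.map_id _)
              intro p hp
              have hp1 : p.1 ∈ pre.map Prod.fst := List.mem_map_of_mem hp
              have hne : p.1 ≠ elf := fun he => helfpre (he ▸ hp1)
              simp [hne]
            · simp [pvEmit, hc, hgetD])
          hnd hlt]

-- ===== VERDICT (by name: the statement is the Claim_ definition above) =====
theorem populate_calorie_data_spec : Claim_equal_populate_calorie_data := by
  intro cal_list _ _
  unfold Spec_populate_calorie_data populate_calorie_data populate_calorie_data_alt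
  rw [pvALoop_items cal_list PySem.Dict.empty [] 1 []
    (by simp [pvEmit, PySem.Dict.empty]) (by simp) (by simp)]
  rw [show ((PySem.List.enumerate (pvBLoop cal_list [] []) 0).filter (fun p => !p.2.isEmpty)).map
      (fun p => (p.1 + 1, p.2.sum)) = pvPost (pvBLoop cal_list [] []) 0 from rfl]
  rw [pvBLoop_post cal_list [] [] 0]
  simp [pvPost]
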